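-- pv_equiv track=rewrite | github.com/Lucidare/ReplaceTTT | ReplaceTTTSolver.py | encoded_counts
-- ===== SOURCE A (Python) =====
-- def encoded_counts(counts):
--     # Create a mapping from digit to its binary representation (2 bits)
--     binary_mapping = {
--         '0': '00',
--         '1': '01',
--         '2': '10',
--         '3': '11'
--     }
--
--     # Initialize a variable for the binary representation
--     counts_binary = counts
--
--     # Replace each digit in the counts string using the binary mapping
--     for digit in sorted(binary_mapping.keys()):  # Sort keys for ascending order
--         counts_binary = counts_binary.replace(digit, binary_mapping[digit])  # Replace in order
--     return counts_binary
-- ===== SOURCE B (Python) =====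
-- def encoded_counts(counts):
--     # Index a tuple by character code instead of dict/replace passes.
--     table = ('00', '01', '10', '11')
--     parts = []
--     for c in counts:
--         parts.append(table[ord(c) - 48] if '0' <= c <= '3' else c)
--     return ''.join(parts)
-- ===== Notes on version B (the rewrite author's own statement) =====
-- stated objective: alternative
-- what changed: Single forward pass appending per-character translations looked up by code-point arithmetic in a fixed tuple, instead of four sequential whole-string str.replace rescans over a dict's sorted keys.
import Mathlib
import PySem

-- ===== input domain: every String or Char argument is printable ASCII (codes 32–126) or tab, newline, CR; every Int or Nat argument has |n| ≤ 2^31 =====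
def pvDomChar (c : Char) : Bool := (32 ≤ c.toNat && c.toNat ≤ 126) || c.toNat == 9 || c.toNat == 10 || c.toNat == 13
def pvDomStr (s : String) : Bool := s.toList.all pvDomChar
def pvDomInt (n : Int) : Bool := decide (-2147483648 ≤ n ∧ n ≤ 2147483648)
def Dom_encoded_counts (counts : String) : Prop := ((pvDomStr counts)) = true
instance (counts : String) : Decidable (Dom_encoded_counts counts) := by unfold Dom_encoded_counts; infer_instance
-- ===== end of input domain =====

-- B replaces A's four sequential whole-string str.replace passes by a single forward pass that
-- appends each character's translation, looked up by code-point arithmetic in a fixed tuple.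

-- ===== PORT A =====
def encoded_counts (counts : String) : String :=
  let binary_mapping : PySem.Dict String String :=
    ((((PySem.Dict.empty.insert "0" "00").insert "1" "01").insert "2" "10").insert "3" "11")
  let counts_binary := counts
  (PySem.List.sorted binary_mapping.keys (fun k => k) false).foldl
    (fun cb digit => PySem.Str.replace cb digit ((binary_mapping.get? digit).getD ""))
    counts_binary

-- ===== PORT B =====
-- table[ord(c) - 48]: the guard '0' <= c <= '3' makes the index in range, so getD is exact.
def encoded_counts_alt (counts : String) : String :=
  let table : List String := ["00", "01", "10", "11"]
  let parts := counts.toList.foldl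
    (fun parts c =>
      parts ++ [if '0' ≤ c ∧ c ≤ '3' then table.getD (c.toNat - 48) "" else String.singleton c])
    []
  PySem.Str.join "" parts

-- ===== PRECONDITION & SPEC =====
def Spec_encoded_counts (counts : String) (out : String) : Prop := out = encoded_counts_alt counts
instance (counts : String) (out : String) : Decidable (Spec_encoded_counts counts out) := by unfold Spec_encoded_counts; infer_instance

-- ===== CLAIM (what is proved, stated in full; the proofs are below) =====
def Claim_equal_encoded_counts : Prop := ∀ (counts : String), Dom_encoded_counts counts → Spec_encoded_counts counts (encoded_counts counts)

-- ===== LEMMAS AND PROOFS =====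

-- Chars.replace with a single-character pattern is a flatMap over the characters.
theorem replace_go_single (d : Char) (new : List Char) :
    ∀ (l : List Char) (fuel : Nat) (acc : List Char), l.length ≤ fuel →
      PySem.Chars.replace.go [d] new fuel l acc =
        acc.reverse ++ l.flatMap (fun c => if c = d then new else [c]) := by
  intro l
  induction l with
  | nil =>
      intro fuel acc _
      rw [PySem.Chars.replace.go.eq_def]
      cases fuel <;> simp
  | cons c t ih =>
      intro fuel acc h
      cases fuel with
      | zero => simp at h
      | succ f =>
          rw [PySem.Chars.replace.go.eq_def]
          by_cases hc : c = d
          · subst hc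
            simp only [List.isPrefixOf, beq_self_eq_true, Bool.true_and, if_pos]
            have hd : List.drop ([c] : List Char).length (c :: t) = t := rfl
            rw [hd, ih f (new.reverse ++ acc) (Nat.le_of_succ_le_succ h)]
            simp
          · have hb : ([d].isPrefixOf (c :: t)) = false := by
              simp [List.isPrefixOf]
              exact fun he => (hc he.symm).elim
            simp only [hb, Bool.false_eq_true, if_neg, not_false_eq_true]
            rw [ih f (c :: acc) (Nat.le_of_succ_le_succ h)]
            simp [hc]

theorem replace_single (s : List Char) (d : Char) (new : List Char) :
    PySem.Chars.replace s [d] new = s.flatMap (fun c => if c = d then new else [c]) := by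
  rw [PySem.Chars.replace]
  simp only [List.isEmpty_cons, Bool.false_eq_true, if_neg, not_false_eq_true]
  simpa using replace_go_single d new s s.length [] le_rfl

-- The per-character effect of A's four passes equals B's guarded table lookup.
theorem per_char (c : Char) :
    ((((if c = '0' then ['0','0'] else [c]).flatMap
        (fun x => if x = '1' then ['0','1'] else [x])).flatMap
        (fun x => if x = '2' then ['1','0'] else [x])).flatMap
        (fun x => if x = '3' then ['1','1'] else [x])) =
      (if '0' ≤ c ∧ c ≤ '3' then
          (["00", "01", "10", "11"] : List String).getD (c.toNat - 48) ""
        else String.singleton c).toList := by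
  by_cases h0 : c = '0'
  · subst h0; decide
  by_cases h1 : c = '1'
  · subst h1; decide
  by_cases h2 : c = '2'
  · subst h2; decide
  by_cases h3 : c = '3'
  · subst h3; decide
  have hcond : ¬ ('0' ≤ c ∧ c ≤ '3') := by
    rintro ⟨hl, hr⟩
    have ha : ('0' : Char).toNat ≤ c.toNat := by exact_mod_cast hl
    have hb : c.toNat ≤ ('3' : Char).toNat := by exact_mod_cast hr
    have e0 : c.toNat ≠ 48 := fun h => h0 (Char.ext (UInt32.toNat_inj.mp (h.trans (by decide))))
    have e1 : c.toNat ≠ 49 := fun h => h1 (Char.ext (UInt32.toNat_inj.mp (h.trans (by decide))))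
    have e2 : c.toNat ≠ 50 := fun h => h2 (Char.ext (UInt32.toNat_inj.mp (h.trans (by decide))))
    have e3 : c.toNat ≠ 51 := fun h => h3 (Char.ext (UInt32.toNat_inj.mp (h.trans (by decide))))
    have n0 : ('0' : Char).toNat = 48 := by decide
    have n3 : ('3' : Char).toNat = 51 := by decide
    rw [n0] at ha; rw [n3] at hb
    omega
  rw [if_neg hcond]
  simp [h0, h1, h2, h3, String.singleton]

theorem keys_sorted :
    PySem.List.sorted
      (((((PySem.Dict.empty.insert "0" "00").insert "1" "01").insert "2" "10").insert "3" "11") :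
        PySem.Dict String String).keys (fun k => k) false = ["0", "1", "2", "3"] := by
  have hk : (((((PySem.Dict.empty.insert "0" "00").insert "1" "01").insert "2" "10").insert "3" "11") :
      PySem.Dict String String).keys = ["0", "1", "2", "3"] := by decide
  rw [hk]
  refine PySem.List.sorted_eq_of_perm_of_pairwise_lt _ _ _ (List.Perm.refl _) ?_
  have lt01 : ("0" : String) < "1" := by rw [String.lt_iff_toList_lt]; decide
  have lt02 : ("0" : String) < "2" := by rw [String.lt_iff_toList_lt]; decide
  have lt03 : ("0" : String) < "3" := by rw [String.lt_iff_toList_lt]; decide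
  have lt12 : ("1" : String) < "2" := by rw [String.lt_iff_toList_lt]; decide
  have lt13 : ("1" : String) < "3" := by rw [String.lt_iff_toList_lt]; decide
  have lt23 : ("2" : String) < "3" := by rw [String.lt_iff_toList_lt]; decide
  refine List.Pairwise.cons (fun b hb => ?_) (List.Pairwise.cons (fun b hb => ?_)
    (List.Pairwise.cons (fun b hb => ?_) (List.Pairwise.cons (fun b hb => ?_) List.Pairwise.nil)))
  · simp only [List.mem_cons, List.not_mem_nil, or_false] at hb
    rcases hb with rfl | rfl | rfl
    exacts [lt01, lt02, lt03]
  · simp only [List.mem_cons, List.not_mem_nil, or_false] at hb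
    rcases hb with rfl | rfl
    exacts [lt12, lt13]
  · simp only [List.mem_cons, List.not_mem_nil, or_false] at hb
    rcases hb with rfl
    exact lt23
  · simp at hb

-- ===== VERDICT (by name: the statement is the Claim_ definition above) =====
theorem encoded_counts_spec : Claim_equal_encoded_counts := by
  intro counts _
  unfold Spec_encoded_counts encoded_counts encoded_counts_alt
  apply String.ext
  simp only [keys_sorted, List.foldl, PySem.Str.toList_replace, PySem.Str.toList_join,
    PySem.List.foldl_append_singleton_eq_map]
  have g0 : ((((((PySem.Dict.empty.insert "0" "00").insert "1" "01").insert "2" "10").insert "3" "11") :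
      PySem.Dict String String).get? "0").getD "" = "00" := by decide
  have g1 : ((((((PySem.Dict.empty.insert "0" "00").insert "1" "01").insert "2" "10").insert "3" "11") :
      PySem.Dict String String).get? "1").getD "" = "01" := by decide
  have g2 : ((((((PySem.Dict.empty.insert "0" "00").insert "1" "01").insert "2" "10").insert "3" "11") :
      PySem.Dict String String).get? "2").getD "" = "10" := by decide
  have g3 : ((((((PySem.Dict.empty.insert "0" "00").insert "1" "01").insert "2" "10").insert "3" "11") :
      PySem.Dict String String).get? "3").getD "" = "11" := by decide
  rw [g0, g1, g2, g3]
  simp only [show ("0" : String).toList = ['0'] from by decide,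
    show ("1" : String).toList = ['1'] from by decide,
    show ("2" : String).toList = ['2'] from by decide,
    show ("3" : String).toList = ['3'] from by decide,
    show ("" : String).toList = [] from by decide,
    show ("00" : String).toList = ['0','0'] from by decide,
    show ("01" : String).toList = ['0','1'] from by decide,
    show ("10" : String).toList = ['1','0'] from by decide,
    show ("11" : String).toList = ['1','1'] from by decide]
  rw [replace_single, replace_single, replace_single, replace_single]
  have hj : ∀ parts : List (List Char),
      PySem.Chars.join [] parts = parts.flatten := by
    intro parts
    induction parts with
    | nil => exact PySem.Chars.join_nil []
    | cons p rest ih =>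
        cases rest with
        | nil => rw [PySem.Chars.join_singleton]; simp
        | cons q r =>
            rw [PySem.Chars.join_cons_cons]
            simp [ih]
  rw [hj]
  simp only [List.nil_append, List.map_map]
  rw [← List.flatMap_def]
  rw [List.flatMap_assoc, List.flatMap_assoc, List.flatMap_assoc]
  congr 1
  funext c
  have h := per_char c
  simp only [List.flatMap_assoc] at h
  simpa [Function.comp] using h
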